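-- pv_equiv track=rewrite | github.com/DavidHolguin/backendpuntogafas | app/tools/lens_catalog.py | _normalize_material
-- ===== SOURCE A (Python) =====
-- MATERIAL_SYNONYMS: dict[str, list[str]] = {
--     "policarbonato": ["poly", "poli", "policarbonato", "airwear"],
--     "cr": ["cr", "cr-39", "cr39", "resina"],
--     "trivex": ["trivex"],
--     "cristal": ["cristal", "glass", "vidrio"],
--     "hi-index": ["hi-index", "alto indice", "1.67", "1.74"],
-- }
--
-- def _normalize_material(hint: str | None) -> str | None:
--     """Map a user material hint to a canonical group key, or None."""
--     if not hint:
--         return None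
--     hint_lower = hint.strip().lower()
--     for canonical, synonyms in MATERIAL_SYNONYMS.items():
--         if hint_lower in synonyms:
--             return canonical
--     return hint_lower  # fallback: use as-is for ilike
-- ===== SOURCE B (Python) =====
-- MATERIAL_SYNONYMS: dict[str, list[str]] = {
--     "policarbonato": ["poly", "poli", "policarbonato", "airwear"],
--     "cr": ["cr", "cr-39", "cr39", "resina"],
--     "trivex": ["trivex"],
--     "cristal": ["cristal", "glass", "vidrio"],
--     "hi-index": ["hi-index", "alto indice", "1.67", "1.74"],
-- }
--
-- # Flattened (synonym, canonical) pairs, sorted once by synonym for binary search.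
-- _PAIRS = sorted((syn, canon) for canon, syns in MATERIAL_SYNONYMS.items() for syn in syns)
--
-- def _normalize_material(hint):
--     """Map a user material hint to a canonical group key, or None."""
--     if not hint:
--         return None
--     hint_lower = hint.strip().lower()
--     lo, hi = 0, len(_PAIRS)
--     while lo < hi:
--         mid = (lo + hi) // 2
--         if _PAIRS[mid][0] < hint_lower:
--             lo = mid + 1
--         else:
--             hi = mid
--     if lo < len(_PAIRS) and _PAIRS[lo][0] == hint_lower:
--         return _PAIRS[lo][1]
--     return hint_lower  # fallback: use as-is for ilike
-- ===== Notes on version B (the rewrite author's own statement) =====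
-- stated objective: alternative
-- what changed: A's per-call linear scan over the synonym-group dict (membership test in each list) is replaced by a flat (synonym, canonical) pair list sorted once at module scope and a hand-written per-call binary search with a final equality check and the same lowered-hint fallback.
import Mathlib
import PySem

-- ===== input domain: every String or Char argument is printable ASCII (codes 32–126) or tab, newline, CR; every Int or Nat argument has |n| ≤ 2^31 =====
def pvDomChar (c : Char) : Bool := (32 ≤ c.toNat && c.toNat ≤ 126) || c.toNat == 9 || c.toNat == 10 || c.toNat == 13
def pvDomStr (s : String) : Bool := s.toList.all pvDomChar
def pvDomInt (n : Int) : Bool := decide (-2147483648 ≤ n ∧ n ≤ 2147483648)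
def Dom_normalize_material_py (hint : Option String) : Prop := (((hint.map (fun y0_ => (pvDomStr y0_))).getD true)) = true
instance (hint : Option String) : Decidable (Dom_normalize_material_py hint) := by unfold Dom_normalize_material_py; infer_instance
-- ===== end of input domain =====

-- B replaces A's per-call linear scan over the synonym-group table by a sorted flat
-- (synonym, canonical) pair list and a hand-written binary search (alternative algorithm).

-- ===== PORT A =====
def pvMaterialSynonyms : List (String × List String) :=
  [("policarbonato", ["poly","poli","policarbonato","airwear"]),
   ("cr", ["cr","cr-39","cr39","resina"]),
   ("trivex", ["trivex"]),
   ("cristal", ["cristal","glass","vidrio"]),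
   ("hi-index", ["hi-index","alto indice","1.67","1.74"])]

-- the 'for canonical, synonyms in MATERIAL_SYNONYMS.items():' loop with its early return
def pvScanA (items : List (String × List String)) (hl : String) : Option String :=
  match items with
  | [] => none
  | (canonical, synonyms) :: rest =>
      if synonyms.contains hl then some canonical else pvScanA rest hl

def normalize_material_py (hint : Option String) : Option String :=
  match hint with
  | none => none
  | some h =>
    if h = "" then none   -- 'if not hint: return None' (empty string is falsy)
    else
      let hint_lower := PySem.Str.lower (PySem.Str.strip h)
      match pvScanA pvMaterialSynonyms hint_lower with
      | some canonical => some canonical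
      | none => some hint_lower   -- fallback: use as-is

-- ===== PORT B =====
-- _PAIRS = sorted((syn, canon) for ...): the flat pair list, sorted by synonym,
-- written out as the literal it evaluates to once at module scope.
def pvPairs : List (String × String) :=
  [("1.67", "hi-index"), ("1.74", "hi-index"), ("airwear", "policarbonato"),
   ("alto indice", "hi-index"), ("cr", "cr"), ("cr-39", "cr"), ("cr39", "cr"),
   ("cristal", "cristal"), ("glass", "cristal"), ("hi-index", "hi-index"),
   ("poli", "policarbonato"), ("policarbonato", "policarbonato"), ("poly", "policarbonato"),
   ("resina", "cr"), ("trivex", "trivex"), ("vidrio", "cristal")]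

-- the 'while lo < hi:' binary-search loop; _PAIRS[mid] is always in range (lo < hi ≤ len),
-- so the hand port reads it with getD (exact here, no IndexError is reachable)
-- Python's 'a < b' on str: lexicographic comparison by code point, written out by hand
-- (exact: Lean's String.< instance is not kernel-reducible, this is)
def pvLtChars : List Char → List Char → Bool
  | _, [] => false
  | [], _ :: _ => true
  | a :: as, b :: bs =>
      if a.toNat < b.toNat then true
      else if b.toNat < a.toNat then false
      else pvLtChars as bs

-- structural fuel = hi - lo (an upper bound on the iterations of the while loop,
-- which shrinks hi - lo every step), so the recursion is the loop, step for step
def pvBSearchAux (hl : String) : Nat → Nat → Nat → Nat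
  | 0, lo, _ => lo
  | fuel + 1, lo, hi =>
    if lo < hi then
      let mid := (lo + hi) / 2
      if pvLtChars (pvPairs.getD mid ("", "")).1.toList hl.toList then pvBSearchAux hl fuel (mid + 1) hi
      else pvBSearchAux hl fuel lo mid
    else lo

def pvBSearch (hl : String) (lo hi : Nat) : Nat := pvBSearchAux hl (hi - lo) lo hi

def normalize_material_py_alt (hint : Option String) : Option String :=
  match hint with
  | none => none
  | some h =>
    if h = "" then none
    else
      let hint_lower := PySem.Str.lower (PySem.Str.strip h)
      let lo := pvBSearch hint_lower 0 pvPairs.length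
      if lo < pvPairs.length && (pvPairs.getD lo ("", "")).1 == hint_lower then
        some (pvPairs.getD lo ("", "")).2
      else some hint_lower  -- fallback: use as-is

-- ===== PRECONDITION & SPEC =====
def Spec_normalize_material_py (hint : Option String) (out : Option String) : Prop := out = normalize_material_py_alt hint
instance (hint : Option String) (out : Option String) : Decidable (Spec_normalize_material_py hint out) := by unfold Spec_normalize_material_py; infer_instance

-- ===== CLAIM (what is proved, stated in full; the proofs are below) =====
def Claim_equal_normalize_material_py : Prop := ∀ (hint : Option String), Dom_normalize_material_py hint → Spec_normalize_material_py hint (normalize_material_py hint)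

-- ===== LEMMAS AND PROOFS =====

-- every synonym appearing in pvPairs (first components)
def pvSynAll : List String :=
  ["1.67","1.74","airwear","alto indice","cr","cr-39","cr39","cristal","glass",
   "hi-index","poli","policarbonato","poly","resina","trivex","vidrio"]

lemma pvPairs_fst_mem (i : Nat) (hi : i < pvPairs.length) :
    (pvPairs.getD i ("", "")).1 ∈ pvSynAll := by
  simp only [pvPairs, List.length] at hi
  interval_cases i <;> decide

set_option maxHeartbeats 2000000 in
lemma pvCore_eq (s : String) :
    (match pvScanA pvMaterialSynonyms s with
     | some canonical => some canonical
     | none => some s) =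
    (if pvBSearch s 0 pvPairs.length < pvPairs.length &&
        (pvPairs.getD (pvBSearch s 0 pvPairs.length) ("", "")).1 == s then
       some (pvPairs.getD (pvBSearch s 0 pvPairs.length) ("", "")).2
     else some s) := by
  by_cases hs : s ∈ pvSynAll
  · -- s is one of the 16 synonym literals: evaluate both sides
    simp only [pvSynAll, List.mem_cons, List.not_mem_nil, or_false] at hs
    rcases hs with h|h|h|h|h|h|h|h|h|h|h|h|h|h|h|h <;> subst h <;> decide
  · -- s matches no synonym: both sides fall back to s
    have hb : (pvBSearch s 0 pvPairs.length < pvPairs.length &&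
        (pvPairs.getD (pvBSearch s 0 pvPairs.length) ("", "")).1 == s) = false := by
      by_cases hlt : pvBSearch s 0 pvPairs.length < pvPairs.length
      · have := pvPairs_fst_mem _ hlt
        simp only [Bool.and_eq_false_iff, beq_eq_false_iff_ne]
        right; intro he; exact hs (he ▸ this)
      · simp [hlt]
    rw [hb]
    simp only [pvSynAll, List.mem_cons, List.not_mem_nil, or_false, not_or] at hs
    obtain ⟨n1,n2,n3,n4,n5,n6,n7,n8,n9,n10,n11,n12,n13,n14,n15,n16⟩ := hs
    simp [pvScanA, pvMaterialSynonyms, n1, n2, n3, n4, n5, n6, n7, n8, n9, n10, n11, n12, n13, n14, n15, n16]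

-- ===== VERDICT (by name: the statement is the Claim_ definition above) =====
set_option maxHeartbeats 2000000 in
theorem normalize_material_py_spec : Claim_equal_normalize_material_py := by
  intro hint _
  unfold Spec_normalize_material_py normalize_material_py normalize_material_py_alt
  cases hint with
  | none => rfl
  | some h =>
    dsimp only
    by_cases hh : h = ""
    · subst hh; rfl
    · rw [if_neg hh, if_neg hh]
      exact pvCore_eq _
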